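-- pv_equiv track=rewrite | github.com/Dofolk/Leetcode_py | 3068.py | maximumValueSum
-- ===== SOURCE A (Python) =====
-- from typing import List
--
-- def maximumValueSum(nums: List[int], k: int, edges: List[List[int]]) -> int:
--     diffs = [(num^k) - num for num in nums]
--     positive = [val for val in diffs if val >= 0]
--     res = sum(nums) + sum(positive)
--     if len(positive) % 2 == 0:
--         return res
--
--     maxNeg = max((val for val in diffs if val < 0), default = float("-inf"))
--     minPos = min(positive)
--     return res + max(maxNeg, -minPos)
-- ===== SOURCE B (Python) =====
-- def maximumValueSum(nums, k, edges):
--     # Parity DP: best sums with an even / odd number of XOR flips so far.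
--     even, odd = 0, None
--     for num in nums:
--         flip = num ^ k
--         if odd is None:
--             even, odd = even + num, even + flip
--         else:
--             even, odd = max(even + num, odd + flip), max(odd + num, even + flip)
--     return even
-- ===== Notes on version B (the rewrite author's own statement) =====
-- stated objective: alternative
-- what changed: Replaced the greedy diff/parity analysis (build diff list, split off nonnegative gains, case-split on parity with max-negative / min-positive corrections) by a single-pass parity DP that maintains the best sums with an even and with an odd number of XOR flips.
import Mathlib
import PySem

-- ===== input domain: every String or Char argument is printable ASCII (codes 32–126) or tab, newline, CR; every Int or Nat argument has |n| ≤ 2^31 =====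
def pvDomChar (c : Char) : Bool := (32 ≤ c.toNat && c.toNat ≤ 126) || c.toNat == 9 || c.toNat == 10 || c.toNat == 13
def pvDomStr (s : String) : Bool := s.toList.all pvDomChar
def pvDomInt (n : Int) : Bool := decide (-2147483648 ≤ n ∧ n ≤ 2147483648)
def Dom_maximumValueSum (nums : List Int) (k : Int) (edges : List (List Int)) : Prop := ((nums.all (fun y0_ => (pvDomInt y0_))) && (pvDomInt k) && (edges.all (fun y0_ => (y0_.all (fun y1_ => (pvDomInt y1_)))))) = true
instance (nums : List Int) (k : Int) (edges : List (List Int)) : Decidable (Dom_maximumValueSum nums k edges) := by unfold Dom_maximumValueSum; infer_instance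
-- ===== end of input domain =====

-- B replaces A's greedy diff/parity case analysis with a one-pass parity DP (alternative, same cost).

-- ===== PORT A =====
def maximumValueSum (nums : List Int) (k : Int) (edges : List (List Int)) : Int :=
  let diffs := nums.map (fun num => PySem.Int.bxor num k - num)
  let positive := diffs.filter (fun val => decide (0 ≤ val))
  let res := nums.sum + positive.sum
  if positive.length % 2 = 0 then res
  else
    -- max(…, default=float("-inf")) ported as Option: none = the -inf default, which
    -- then never wins the following max against the int -minPos
    let maxNeg := PySem.List.max? (diffs.filter (fun val => decide (val < 0))) (fun y => y)
    -- positive is nonempty in this branch (odd length), so min() cannot raise; getD 0 unreachable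
    let minPos := (PySem.List.min? positive (fun y => y)).getD 0
    match maxNeg with
    | none => res + (-minPos)
    | some m => res + max m (-minPos)

-- ===== PORT B =====
def maximumValueSum_alt (nums : List Int) (k : Int) (edges : List (List Int)) : Int :=
  (nums.foldl (fun (s : Int × Option Int) num =>
      let flip := PySem.Int.bxor num k
      match s with
      | (even, none) => (even + num, some (even + flip))
      | (even, some odd) => (max (even + num) (odd + flip), some (max (odd + num) (even + flip)))
    ) (0, none)).1

-- ===== PRECONDITION & SPEC =====
def Spec_maximumValueSum (nums : List Int) (k : Int) (edges : List (List Int)) (out : Int) : Prop := out = maximumValueSum_alt nums k edges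
instance (nums : List Int) (k : Int) (edges : List (List Int)) (out : Int) : Decidable (Spec_maximumValueSum nums k edges out) := by unfold Spec_maximumValueSum; infer_instance

-- ===== CLAIM (what is proved, stated in full; the proofs are below) =====
def Claim_equal_maximumValueSum : Prop := ∀ (nums : List Int) (k : Int) (edges : List (List Int)), Dom_maximumValueSum nums k edges → Spec_maximumValueSum nums k edges (maximumValueSum nums k edges)

-- ===== LEMMAS AND PROOFS =====

-- the DP step on pure diffs (the per-element "+ num" factored out)
def pstep (s : Int × Option Int) (d : Int) : Int × Option Int :=
  match s with
  | (e, none) => (e, some (e + d))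
  | (e, some o) => (max e (o + d), some (max o (e + d)))

-- A's correction term in the odd case, stated over the diff list
def adj (l : List Int) : Int :=
  match PySem.List.max? (l.filter (fun v => decide (v < 0))) (fun y => y),
        PySem.List.min? (l.filter (fun v => decide (0 ≤ v))) (fun y => y) with
  | some a, some b => max a (-b)
  | some a, none => a
  | none, some b => -b
  | none, none => 0

lemma foldl_pstep_shift (l : List Int) : ∀ (c e : Int) (o : Option Int),
    l.foldl pstep (e + c, o.map (· + c)) =
      ((l.foldl pstep (e, o)).1 + c, (l.foldl pstep (e, o)).2.map (· + c)) := by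
  induction l with
  | nil => intro c e o; simp
  | cons d t ih =>
    intro c e o
    cases o with
    | none =>
      simp only [List.foldl_cons, Option.map_none, pstep]
      have h := ih c e (some (e + d))
      simp only [Option.map_some] at h
      rw [show e + c + d = e + d + c from by ring]
      exact h
    | some o =>
      simp only [List.foldl_cons, Option.map_some, pstep]
      have h1 : max (e + c) (o + c + d) = max e (o + d) + c := by omega
      have h2 : max (o + c) (e + c + d) = max o (e + d) + c := by omega
      rw [h1, h2]
      have h := ih c (max e (o + d)) (some (max o (e + d)))
      simp only [Option.map_some] at h
      exact h

lemma fold_B_eq (k : Int) (nums : List Int) : ∀ (e : Int) (o : Option Int),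
    nums.foldl (fun (s : Int × Option Int) num =>
      let flip := PySem.Int.bxor num k
      match s with
      | (even, none) => (even + num, some (even + flip))
      | (even, some odd) => (max (even + num) (odd + flip), some (max (odd + num) (even + flip)))) (e, o)
    = (((nums.map (fun n => PySem.Int.bxor n k - n)).foldl pstep (e, o)).1 + nums.sum,
       ((nums.map (fun n => PySem.Int.bxor n k - n)).foldl pstep (e, o)).2.map (· + nums.sum)) := by
  induction nums with
  | nil => intro e o; simp
  | cons n t ih =>
    intro e o
    cases o with
    | none =>
      simp only [List.foldl_cons, List.map_cons, List.sum_cons, pstep]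
      rw [ih]
      have hs := foldl_pstep_shift (t.map (fun m => PySem.Int.bxor m k - m)) n e
        (some (e + (PySem.Int.bxor n k - n)))
      simp only [Option.map_some] at hs
      rw [show e + PySem.Int.bxor n k = e + (PySem.Int.bxor n k - n) + n from by ring, hs]
      simp only [Option.map_map, Prod.mk.injEq]
      refine ⟨by ring, ?_⟩
      cases (List.foldl pstep (e, some (e + (PySem.Int.bxor n k - n)))
          (t.map fun m => PySem.Int.bxor m k - m)).2 with
      | none => simp
      | some v => simp only [Option.map_some, Function.comp, Option.some.injEq]; ring
    | some o =>
      simp only [List.foldl_cons, List.map_cons, List.sum_cons, pstep]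
      rw [ih]
      have hs := foldl_pstep_shift (t.map (fun m => PySem.Int.bxor m k - m)) n
        (max e (o + (PySem.Int.bxor n k - n))) (some (max o (e + (PySem.Int.bxor n k - n))))
      simp only [Option.map_some] at hs
      rw [show max (e + n) (o + PySem.Int.bxor n k) = max e (o + (PySem.Int.bxor n k - n)) + n from by omega,
          show max (o + n) (e + PySem.Int.bxor n k) = max o (e + (PySem.Int.bxor n k - n)) + n from by omega,
          hs]
      simp only [Option.map_map, Prod.mk.injEq]
      refine ⟨by ring, ?_⟩
      cases (List.foldl pstep (max e (o + (PySem.Int.bxor n k - n)), some (max o (e + (PySem.Int.bxor n k - n))))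
          (t.map fun m => PySem.Int.bxor m k - m)).2 with
      | none => simp
      | some v => simp only [Option.map_some, Function.comp, Option.some.injEq]; ring

-- nil/snoc forms of Python max()/min() with identity key
lemma max?_id_nil : PySem.List.max? ([] : List Int) (fun y => y) = none := by
  rw [PySem.List.max?_eq_none_iff]

lemma min?_id_nil : PySem.List.min? ([] : List Int) (fun y => y) = none := by
  rw [PySem.List.min?_eq_none_iff]

lemma max?_id_snoc (xs : List Int) (x : Int) :
    PySem.List.max? (xs ++ [x]) (fun y => y) =
      some (match PySem.List.max? xs (fun y => y) with | none => x | some m => max m x) := by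
  cases xs with
  | nil => simp [PySem.List.max?_id_cons, max?_id_nil]
  | cons y t => simp [PySem.List.max?_id_cons, List.foldl_append]

lemma min?_id_snoc (xs : List Int) (x : Int) :
    PySem.List.min? (xs ++ [x]) (fun y => y) =
      some (match PySem.List.min? xs (fun y => y) with | none => x | some m => min m x) := by
  cases xs with
  | nil => simp [PySem.List.min?_id_cons, min?_id_nil]
  | cons y t => simp [PySem.List.min?_id_cons, List.foldl_append]

lemma max?_neg_lt (l : List Int) (a : Int)
    (h : PySem.List.max? (l.filter (fun v => decide (v < 0))) (fun y => y) = some a) : a < 0 := by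
  have hm := PySem.List.max?_mem h
  simpa using (List.of_mem_filter hm)

lemma min?_pos_nonneg (l : List Int) (b : Int)
    (h : PySem.List.min? (l.filter (fun v => decide (0 ≤ v))) (fun y => y) = some b) : 0 ≤ b := by
  have hm := PySem.List.min?_mem h
  simpa using (List.of_mem_filter hm)

lemma not_both_none (l : List Int) (hl : l ≠ [])
    (hN : PySem.List.max? (l.filter (fun v => decide (v < 0))) (fun y => y) = none)
    (hP : PySem.List.min? (l.filter (fun v => decide (0 ≤ v))) (fun y => y) = none) : False := by
  rw [PySem.List.max?_eq_none_iff] at hN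
  rw [PySem.List.min?_eq_none_iff] at hP
  obtain ⟨x, hx⟩ := List.exists_mem_of_ne_nil l hl
  by_cases h0 : 0 ≤ x
  · have : x ∈ l.filter (fun v => decide (0 ≤ v)) := List.mem_filter.2 ⟨hx, by simpa⟩
    simp [hP] at this
  · have : x ∈ l.filter (fun v => decide (v < 0)) := List.mem_filter.2 ⟨hx, by simp; omega⟩
    simp [hN] at this

lemma pos_ne_nil_of_odd (l : List Int)
    (h : (l.filter (fun v => decide (0 ≤ v))).length % 2 = 1) :
    l.filter (fun v => decide (0 ≤ v)) ≠ [] := by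
  intro he; rw [he] at h; simp at h

-- characterization of the DP over an arbitrary diff list
lemma pstep_char (l : List Int) :
    (l.foldl pstep (0, none)).1 =
      (if (l.filter (fun v => decide (0 ≤ v))).length % 2 = 0
       then (l.filter (fun v => decide (0 ≤ v))).sum
       else (l.filter (fun v => decide (0 ≤ v))).sum + adj l) ∧
    (l.foldl pstep (0, none)).2 =
      (if l = [] then none
       else some (if (l.filter (fun v => decide (0 ≤ v))).length % 2 = 1
                  then (l.filter (fun v => decide (0 ≤ v))).sum
                  else (l.filter (fun v => decide (0 ≤ v))).sum + adj l)) := by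
  induction l using List.reverseRecOn with
  | nil => simp
  | append_singleton l d ih =>
    obtain ⟨hE, hO⟩ := ih
    rw [List.foldl_append]
    by_cases hl : l = []
    · subst hl
      by_cases hd : (0:Int) ≤ d
      · have h1 : ¬ d < 0 := by omega
        simp [pstep, adj, List.filter_cons, hd, h1, max?_id_nil, min?_id_nil,
              PySem.List.min?_id_cons, PySem.List.max?_id_cons] <;> omega
      · have h1 : d < 0 := by omega
        simp [pstep, adj, List.filter_cons, hd, h1, max?_id_nil, min?_id_nil,
              PySem.List.min?_id_cons, PySem.List.max?_id_cons] <;> omega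
    · rcases hacc : List.foldl pstep (0, none) l with ⟨E, O⟩
      rw [hacc] at hE hO
      simp only [hl, if_false] at hE hO
      by_cases hd : (0:Int) ≤ d
      · -- d joins the nonnegative side
        have hfp : (l ++ [d]).filter (fun v => decide (0 ≤ v))
            = l.filter (fun v => decide (0 ≤ v)) ++ [d] := by
          simp [List.filter_append, hd]
        have hfn : (l ++ [d]).filter (fun v => decide (v < 0))
            = l.filter (fun v => decide (v < 0)) := by
          simp [List.filter_append, show ¬ d < 0 from by omega]
        rcases hmN : PySem.List.max? (l.filter (fun v => decide (v < 0))) (fun y => y) with _ | a <;>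
          rcases hmP : PySem.List.min? (l.filter (fun v => decide (0 ≤ v))) (fun y => y) with _ | b
        · exact absurd hmP (fun h => not_both_none l hl hmN h)
        · have hb := min?_pos_nonneg l b hmP
          simp only [adj, hmN, hmP] at hE hO
          subst hE; subst hO
          simp only [List.foldl_cons, List.foldl_nil, pstep, adj, hfp, hfn, hmN,
            max?_id_snoc, min?_id_snoc, max?_id_nil, min?_id_nil, PySem.List.max?_id_cons, PySem.List.min?_id_cons, List.nil_append, hmP, List.sum_append, List.length_append,
            List.sum_cons, List.sum_nil, List.length_cons, List.length_nil,
            List.append_eq_nil_iff, Prod.mk.injEq]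
          refine ⟨by simp only [max_def, min_def]; split_ifs <;> omega, ?_⟩
          simp only [List.cons_ne_self, and_false, if_false, Option.some.injEq]
          simp only [max_def, min_def]; split_ifs <;> omega
        · have hpe : l.filter (fun v => decide (0 ≤ v)) = [] := by
            rwa [PySem.List.min?_eq_none_iff] at hmP
          have ha := max?_neg_lt l a hmN
          simp only [adj, hmN, hmP] at hE hO
          subst hE; subst hO
          simp only [List.foldl_cons, List.foldl_nil, pstep, adj, hfp, hfn, hmN,
            max?_id_snoc, min?_id_snoc, max?_id_nil, min?_id_nil, PySem.List.max?_id_cons, PySem.List.min?_id_cons, List.nil_append, hmP, hpe, List.nil_append, List.sum_cons,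
            List.sum_nil, List.length_cons, List.length_nil, List.append_eq_nil_iff,
            Prod.mk.injEq]
          refine ⟨by simp only [max_def, min_def]; split_ifs <;> omega, ?_⟩
          simp only [List.cons_ne_self, List.cons_ne_nil, and_false, if_false, Option.some.injEq]
          simp only [max_def, min_def]; split_ifs <;> omega
        · have ha := max?_neg_lt l a hmN
          have hb := min?_pos_nonneg l b hmP
          simp only [adj, hmN, hmP] at hE hO
          subst hE; subst hO
          simp only [List.foldl_cons, List.foldl_nil, pstep, adj, hfp, hfn, hmN,
            max?_id_snoc, min?_id_snoc, max?_id_nil, min?_id_nil, PySem.List.max?_id_cons, PySem.List.min?_id_cons, List.nil_append, hmP, List.sum_append, List.length_append,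
            List.sum_cons, List.sum_nil, List.length_cons, List.length_nil,
            List.append_eq_nil_iff, Prod.mk.injEq]
          refine ⟨by simp only [max_def, min_def]; split_ifs <;> omega, ?_⟩
          simp only [List.cons_ne_self, List.cons_ne_nil, and_false, if_false, Option.some.injEq]
          simp only [max_def, min_def]; split_ifs <;> omega
      · -- d joins the negative side
        have hfp : (l ++ [d]).filter (fun v => decide (0 ≤ v))
            = l.filter (fun v => decide (0 ≤ v)) := by
          simp [List.filter_append, hd]
        have hfn : (l ++ [d]).filter (fun v => decide (v < 0))
            = l.filter (fun v => decide (v < 0)) ++ [d] := by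
          simp [List.filter_append, show d < 0 from by omega]
        rcases hmN : PySem.List.max? (l.filter (fun v => decide (v < 0))) (fun y => y) with _ | a <;>
          rcases hmP : PySem.List.min? (l.filter (fun v => decide (0 ≤ v))) (fun y => y) with _ | b
        · exact absurd hmP (fun h => not_both_none l hl hmN h)
        · have hb := min?_pos_nonneg l b hmP
          simp only [adj, hmN, hmP] at hE hO
          subst hE; subst hO
          simp only [List.foldl_cons, List.foldl_nil, pstep, adj, hfp, hfn, hmP,
            max?_id_snoc, min?_id_snoc, max?_id_nil, min?_id_nil, PySem.List.max?_id_cons, PySem.List.min?_id_cons, List.nil_append, hmN, List.append_eq_nil_iff, Prod.mk.injEq]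
          refine ⟨by simp only [max_def, min_def]; split_ifs <;> omega, ?_⟩
          simp only [List.cons_ne_self, List.cons_ne_nil, and_false, if_false, Option.some.injEq]
          simp only [max_def, min_def]; split_ifs <;> omega
        · have ha := max?_neg_lt l a hmN
          have hpe : l.filter (fun v => decide (0 ≤ v)) = [] := by
            rwa [PySem.List.min?_eq_none_iff] at hmP
          simp only [adj, hmN, hmP] at hE hO
          subst hE; subst hO
          simp only [List.foldl_cons, List.foldl_nil, pstep, adj, hfp, hfn, hmP,
            max?_id_snoc, min?_id_snoc, max?_id_nil, min?_id_nil, PySem.List.max?_id_cons, PySem.List.min?_id_cons, List.nil_append, hmN, hpe, List.sum_nil, List.length_nil,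
            List.append_eq_nil_iff, Prod.mk.injEq]
          refine ⟨by simp only [max_def, min_def]; split_ifs <;> omega, ?_⟩
          simp only [List.cons_ne_self, List.cons_ne_nil, and_false, if_false, Option.some.injEq]
          simp only [max_def, min_def]; split_ifs <;> omega
        · have ha := max?_neg_lt l a hmN
          have hb := min?_pos_nonneg l b hmP
          simp only [adj, hmN, hmP] at hE hO
          subst hE; subst hO
          simp only [List.foldl_cons, List.foldl_nil, pstep, adj, hfp, hfn, hmP,
            max?_id_snoc, min?_id_snoc, max?_id_nil, min?_id_nil, PySem.List.max?_id_cons, PySem.List.min?_id_cons, List.nil_append, hmN, List.append_eq_nil_iff, Prod.mk.injEq]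
          refine ⟨by simp only [max_def, min_def]; split_ifs <;> omega, ?_⟩
          simp only [List.cons_ne_self, List.cons_ne_nil, and_false, if_false, Option.some.injEq]
          simp only [max_def, min_def]; split_ifs <;> omega

-- ===== VERDICT (by name: the statement is the Claim_ definition above) =====
theorem maximumValueSum_spec : Claim_equal_maximumValueSum := by
  intro nums k edges _
  unfold Spec_maximumValueSum maximumValueSum maximumValueSum_alt
  rw [fold_B_eq]
  obtain ⟨hE, -⟩ := pstep_char (nums.map (fun n => PySem.Int.bxor n k - n))
  rw [hE]
  set ds := nums.map (fun n => PySem.Int.bxor n k - n) with hds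
  by_cases hpar : (ds.filter (fun v => decide (0 ≤ v))).length % 2 = 0
  · simp [hpar, adj]
    ring
  · simp only [hpar, if_false, if_neg hpar]
    have hne := pos_ne_nil_of_odd ds (by omega)
    rcases hmP : PySem.List.min? (ds.filter (fun v => decide (0 ≤ v))) (fun y => y) with _ | b
    · exact absurd (Iff.mp (PySem.List.min?_eq_none_iff _ _) hmP) hne
    · rcases hmN : PySem.List.max? (ds.filter (fun v => decide (v < 0))) (fun y => y) with _ | a <;>
        simp [adj, hmP, hmN] <;> ring
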